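-- pv_equiv track=rewrite | github.com/Henildiyora/DocuMind | src/documind/chunker.py | _split_lines_into_chunks
-- ===== SOURCE A (Python) =====
-- def _split_lines_into_chunks(
--     text: str,
--     chunk_size: int,
--     chunk_overlap: int,
-- ) -> list[tuple[int, int, str]]:
--     """Line-aware chunking targeting `chunk_size` characters per chunk.
--
--     Returns (start_line, end_line, text) tuples with 1-based inclusive lines.
--     """
--     if not text:
--         return []
--     lines = text.splitlines(keepends=True)
--     chunks: list[tuple[int, int, str]] = []
--
--     i = 0
--     n = len(lines)
--     while i < n:
--         cur_len = 0
--         j = i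
--         while j < n and cur_len + len(lines[j]) <= chunk_size:
--             cur_len += len(lines[j])
--             j += 1
--         if j == i:
--             j = i + 1
--         start_line = i + 1
--         end_line = j
--         chunk_text = "".join(lines[i:j]).strip("\n")
--         if chunk_text.strip():
--             chunks.append((start_line, end_line, chunk_text))
--
--         if j >= n:
--             break
--
--         # Step back by `chunk_overlap` worth of characters (line-aligned)
--         back = 0
--         k = j
--         while k > i and back < chunk_overlap:
--             k -= 1
--             back += len(lines[k])
--         i = max(k, i + 1)
--
--     return chunks
-- ===== SOURCE B (Python) =====
-- def _split_lines_into_chunks(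
--     text: str,
--     chunk_size: int,
--     chunk_overlap: int,
-- ) -> list[tuple[int, int, str]]:
--     """Line-aware chunking via a prefix-sum array and binary search.
--
--     Returns (start_line, end_line, text) tuples with 1-based inclusive lines.
--     """
--     if not text:
--         return []
--     lines = text.splitlines(keepends=True)
--     n = len(lines)
--
--     # prefix[m] = total characters of lines[0:m]
--     prefix = [0]
--     total = 0
--     for ln in lines:
--         total += len(ln)
--         prefix.append(total)
--
--     def bis_right(x: int, lo: int, hi: int) -> int:
--         # rightmost insertion point of x in prefix[lo:hi] (prefix is sorted)
--         while lo < hi: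
--             mid = (lo + hi) // 2
--             if prefix[mid] <= x:
--                 lo = mid + 1
--             else:
--                 hi = mid
--         return lo
--
--     chunks: list[tuple[int, int, str]] = []
--     i = 0
--     while i < n:
--         # largest j in [i, n] with prefix[j] - prefix[i] <= chunk_size (clamped to >= i)
--         j = max(bis_right(prefix[i] + chunk_size, i, n + 1) - 1, i)
--         if j == i:
--             j = i + 1
--         chunk_text = "".join(lines[i:j]).strip("\n")
--         if chunk_text.strip():
--             chunks.append((i + 1, j, chunk_text))
--         if j >= n:
--             break
--         # line-aligned overlap: largest k in [i, j] with prefix[j] - prefix[k] >= chunk_overlap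
--         k = max(bis_right(prefix[j] - chunk_overlap, i, j + 1) - 1, i)
--         i = max(k, i + 1)
--     return chunks
-- ===== Notes on version B (the rewrite author's own statement) =====
-- stated objective: alternative
-- what changed: Replaces A's per-chunk linear accumulation loops (forward size scan and backward overlap scan over line lengths) with a prefix-sum array built once plus a hand-written binary search that locates both the chunk-end and the overlap step-back boundaries.
import Mathlib
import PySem

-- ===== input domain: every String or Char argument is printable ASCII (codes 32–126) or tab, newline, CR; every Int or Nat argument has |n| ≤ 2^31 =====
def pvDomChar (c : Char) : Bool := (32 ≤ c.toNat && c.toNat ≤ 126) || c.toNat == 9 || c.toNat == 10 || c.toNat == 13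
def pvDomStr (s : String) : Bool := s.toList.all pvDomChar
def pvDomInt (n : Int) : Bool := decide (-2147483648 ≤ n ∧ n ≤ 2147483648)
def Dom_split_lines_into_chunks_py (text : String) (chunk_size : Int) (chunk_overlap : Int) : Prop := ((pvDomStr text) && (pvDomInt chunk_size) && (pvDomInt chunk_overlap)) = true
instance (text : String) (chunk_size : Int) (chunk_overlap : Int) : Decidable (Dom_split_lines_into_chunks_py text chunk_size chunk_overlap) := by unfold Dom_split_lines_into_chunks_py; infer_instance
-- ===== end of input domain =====

-- B replaces A's per-chunk linear forward/backward line-length scans by a prefix-sum array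
-- built once plus a hand-written binary search for both chunk boundaries (objective: alternative).

-- ===== PORT A =====
-- text.splitlines(keepends=True), ported by hand over List Char.
-- Exact on the stated domain: its characters are printable ASCII / tab / '\n' / '\r', and
-- Python splits exactly at '\n', '\r' and '\r\n' there (tab is not a line break).
def pyTakeLine : List Char → List Char × List Char
  | [] => ([], [])
  | c :: rest =>
    if c = '\n' then (['\n'], rest)
    else if c = '\r' then
      match rest with
      | '\n' :: rest' => (['\r', '\n'], rest')
      | _ => (['\r'], rest)
    else
      let p := pyTakeLine rest
      (c :: p.1, p.2)

-- fuel-guarded loop (fuel = cs.length suffices: each line removes at least one char)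
def pySplitKeepGo : Nat → List Char → List (List Char)
  | _, [] => []
  | 0, _ => []
  | fuel + 1, cs => (pyTakeLine cs).1 :: pySplitKeepGo fuel (pyTakeLine cs).2

def pySplitKeep (cs : List Char) : List (List Char) := pySplitKeepGo cs.length cs

-- inner while: `while j < n and cur_len + len(lines[j]) <= chunk_size`
-- (indexing via getD: the index is in range whenever it is read)
def aScanJ (lines : List (List Char)) (chunk_size : Int) : Nat → Int → Nat → Int × Nat
  | 0, cur_len, j => (cur_len, j)
  | fuel + 1, cur_len, j =>
    if j < lines.length ∧ cur_len + ((lines.getD j []).length : Int) ≤ chunk_size then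
      aScanJ lines chunk_size fuel (cur_len + ((lines.getD j []).length : Int)) (j + 1)
    else (cur_len, j)

-- step-back while: `while k > i and back < chunk_overlap: k -= 1; back += len(lines[k])`
def aScanK (lines : List (List Char)) (chunk_overlap : Int) (i : Nat) : Nat → Int → Nat → Int × Nat
  | 0, back, k => (back, k)
  | fuel + 1, back, k =>
    if i < k ∧ back < chunk_overlap then
      aScanK lines chunk_overlap i fuel (back + ((lines.getD (k - 1) []).length : Int)) (k - 1)
    else (back, k)

-- outer while, fuel-guarded (fuel = lines.length suffices: i strictly increases each pass)
def aLoop (lines : List (List Char)) (chunk_size chunk_overlap : Int) : Nat → Nat → List (Int × Int × String) → List (Int × Int × String)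
  | 0, _, chunks => chunks
  | fuel + 1, i, chunks =>
    if i < lines.length then
      let j0 := (aScanJ lines chunk_size (lines.length - i) 0 i).2
      let j := if j0 = i then i + 1 else j0
      let chunk_text := PySem.Chars.stripChars (PySem.Chars.join [] (PySem.List.slice lines (some (i : Int)) (some (j : Int)))) ['\n']
      let chunks' := if PySem.Chars.strip chunk_text ≠ [] then chunks ++ [(((i : Int) + 1, (j : Int), String.ofList chunk_text))] else chunks
      if lines.length ≤ j then chunks'
      else aLoop lines chunk_size chunk_overlap fuel (max (aScanK lines chunk_overlap i j 0 j).2 (i + 1)) chunks'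
    else chunks

def split_lines_into_chunks_py (text : String) (chunk_size : Int) (chunk_overlap : Int) : List (Int × Int × String) :=
  if text = "" then []
  else aLoop (pySplitKeep text.toList) chunk_size chunk_overlap (pySplitKeep text.toList).length 0 []

-- ===== PORT B =====
-- prefix[m] = total characters of lines[0:m], built once by the for-loop over lines
def bBuildPrefix (lines : List (List Char)) : List Int × Int :=
  lines.foldl (fun pt ln => (pt.1 ++ [pt.2 + (ln.length : Int)], pt.2 + (ln.length : Int))) ([0], 0)

-- hand-written bisect_right, fuel-guarded (fuel = hi - lo suffices; (lo+hi)//2 = Nat division: both ≥ 0)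
def bBisR (pre : List Int) (x : Int) : Nat → Nat → Nat → Nat
  | 0, lo, _ => lo
  | fuel + 1, lo, hi =>
    if lo < hi then
      if pre.getD ((lo + hi) / 2) 0 ≤ x then bBisR pre x fuel ((lo + hi) / 2 + 1) hi
      else bBisR pre x fuel lo ((lo + hi) / 2)
    else lo

def bLoop (lines : List (List Char)) (pre : List Int) (chunk_size chunk_overlap : Int) : Nat → Nat → List (Int × Int × String) → List (Int × Int × String)
  | 0, _, chunks => chunks
  | fuel + 1, i, chunks =>
    if i < lines.length then
      let j0 := max (bBisR pre (pre.getD i 0 + chunk_size) (lines.length + 1 - i) i (lines.length + 1) - 1) i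
      let j := if j0 = i then i + 1 else j0
      let chunk_text := PySem.Chars.stripChars (PySem.Chars.join [] (PySem.List.slice lines (some (i : Int)) (some (j : Int)))) ['\n']
      let chunks' := if PySem.Chars.strip chunk_text ≠ [] then chunks ++ [(((i : Int) + 1, (j : Int), String.ofList chunk_text))] else chunks
      if lines.length ≤ j then chunks'
      else bLoop lines pre chunk_size chunk_overlap fuel (max (max (bBisR pre (pre.getD j 0 - chunk_overlap) (j + 1 - i) i (j + 1) - 1) i) (i + 1)) chunks'
    else chunks

def split_lines_into_chunks_py_alt (text : String) (chunk_size : Int) (chunk_overlap : Int) : List (Int × Int × String) :=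
  if text = "" then []
  else
    let lines := pySplitKeep text.toList
    bLoop lines (bBuildPrefix lines).1 chunk_size chunk_overlap lines.length 0 []

-- ===== PRECONDITION & SPEC =====
def Spec_split_lines_into_chunks_py (text : String) (chunk_size : Int) (chunk_overlap : Int) (out : List (Int × Int × String)) : Prop := out = split_lines_into_chunks_py_alt text chunk_size chunk_overlap
instance (text : String) (chunk_size : Int) (chunk_overlap : Int) (out : List (Int × Int × String)) : Decidable (Spec_split_lines_into_chunks_py text chunk_size chunk_overlap out) := by unfold Spec_split_lines_into_chunks_py; infer_instance

-- ===== CLAIM (what is proved, stated in full; the proofs are below) =====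
def Claim_equal_split_lines_into_chunks_py : Prop := ∀ (text : String) (chunk_size : Int) (chunk_overlap : Int), Dom_split_lines_into_chunks_py text chunk_size chunk_overlap → Spec_split_lines_into_chunks_py text chunk_size chunk_overlap (split_lines_into_chunks_py text chunk_size chunk_overlap)

-- ===== LEMMAS AND PROOFS =====

-- prefix character count of the first m lines
def pfxI (lines : List (List Char)) (m : Nat) : Int :=
  ((lines.take m).map (fun l => (l.length : Int))).sum

theorem pfxI_mono (lines : List (List Char)) (a b : Nat) (hab : a ≤ b) :
    pfxI lines a ≤ pfxI lines b := by
  unfold pfxI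
  have : lines.take b = lines.take a ++ (lines.drop a).take (b - a) := by
    rw [← List.take_add, Nat.add_sub_cancel' hab]
  rw [this, List.map_append, List.sum_append]
  have : 0 ≤ (((lines.drop a).take (b - a)).map (fun l => (l.length : Int))).sum :=
    List.sum_nonneg (by
      intro x hx
      rcases List.mem_map.1 hx with ⟨l, _, rfl⟩
      exact Int.natCast_nonneg _)
  omega

theorem pfxI_succ (lines : List (List Char)) (m : Nat) (h : m < lines.length) :
    pfxI lines (m + 1) = pfxI lines m + ((lines.getD m []).length : Int) := by
  unfold pfxI
  rw [List.take_add_one, List.map_append, List.sum_append, List.getElem?_eq_getElem h,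
    List.getD_eq_getElem lines [] h]
  simp

theorem pfxI_cons (ln : List Char) (rest : List (List Char)) (k : Nat) :
    pfxI (ln :: rest) (k + 1) = (ln.length : Int) + pfxI rest k := by
  simp [pfxI]

theorem bFold (l : List (List Char)) : ∀ (p : List Int) (t : Int),
    (l.foldl (fun pt ln => (pt.1 ++ [pt.2 + (ln.length : Int)], pt.2 + (ln.length : Int))) (p, t)).1
      = p ++ (List.range l.length).map (fun m => t + pfxI l (m + 1)) := by
  induction l with
  | nil => simp
  | cons ln rest ih =>
    intro p t
    simp only [List.foldl_cons, List.length_cons]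
    rw [ih, List.range_succ_eq_map]
    simp only [List.map_cons, List.map_map, List.append_assoc, List.singleton_append]
    have h1 : t + pfxI (ln :: rest) (0 + 1) = t + (ln.length : Int) := by simp [pfxI]
    have h2 : ((fun m => t + pfxI (ln :: rest) (m + 1)) ∘ Nat.succ) = (fun m => t + (ln.length : Int) + pfxI rest (m + 1)) := by
      funext m
      simp only [Function.comp_apply, Nat.succ_eq_add_one, pfxI_cons]
      ring
    rw [h1, h2]

theorem bBuildPrefix_getD (lines : List (List Char)) (m : Nat) (hm : m ≤ lines.length) :
    ((bBuildPrefix lines).1).getD m 0 = pfxI lines m := by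
  unfold bBuildPrefix
  rw [bFold]
  cases m with
  | zero => simp [pfxI]
  | succ m' =>
    have hm' : m' < lines.length := by omega
    simp only [List.singleton_append, List.getD_cons_succ]
    rw [List.getD_eq_getElem _ _ (by simpa using hm')]
    simp

theorem bBisR_spec (pre : List Int) (x : Int) : ∀ (d lo hi : Nat), hi - lo ≤ d → lo ≤ hi →
    lo ≤ bBisR pre x d lo hi ∧ bBisR pre x d lo hi ≤ hi ∧
    (bBisR pre x d lo hi = lo ∨ pre.getD (bBisR pre x d lo hi - 1) 0 ≤ x) ∧
    (bBisR pre x d lo hi = hi ∨ ¬ pre.getD (bBisR pre x d lo hi) 0 ≤ x) := by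
  intro d
  induction d with
  | zero =>
    intro lo hi h1 h2
    simp only [bBisR]
    exact ⟨Nat.le_refl _, h2, by simp, Or.inl (by omega)⟩
  | succ d ih =>
    intro lo hi h1 h2
    simp only [bBisR]
    by_cases hlt : lo < hi
    · simp only [if_pos hlt]
      have hm1 : lo ≤ (lo + hi) / 2 ∧ (lo + hi) / 2 < hi := by omega
      by_cases hc : pre.getD ((lo + hi) / 2) 0 ≤ x
      · simp only [if_pos hc]
        have hr := ih ((lo + hi) / 2 + 1) hi (by omega) (by omega)
        refine ⟨by omega, hr.2.1, ?_, hr.2.2.2⟩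
        rcases hr.2.2.1 with h | h
        · right; rw [h]; simpa using hc
        · right; exact h
      · simp only [if_neg hc]
        have hr := ih lo ((lo + hi) / 2) (by omega) (by omega)
        refine ⟨hr.1, by omega, hr.2.2.1, ?_⟩
        rcases hr.2.2.2 with h | h
        · right; rw [h]; exact hc
        · right; exact h
    · simp only [if_neg hlt]
      exact ⟨Nat.le_refl _, h2, by simp, Or.inl (Nat.le_antisymm h2 (Nat.le_of_not_lt hlt))⟩

-- the four boundary properties (relative to f = pfxI lines on [i, N]) determine the index
def Bdry (f : Nat → Int) (i N : Nat) (x : Int) (u : Nat) : Prop :=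
  i ≤ u ∧ u ≤ N ∧ (u = i ∨ f u ≤ x) ∧ (u = N ∨ x < f (u + 1))

theorem bdry_unique (f : Nat → Int) (i N : Nat) (x : Int)
    (mono : ∀ a b, a ≤ b → b ≤ N → f a ≤ f b)
    (u v : Nat) (hu : Bdry f i N x u) (hv : Bdry f i N x v) : u = v := by
  have aux : ∀ a b : Nat, Bdry f i N x a → Bdry f i N x b → ¬ (a < b) := by
    intro a b ⟨ha1, ha2, _, ha4⟩ ⟨hb1, hb2, hb3, _⟩ hab
    have hbx : f b ≤ x := hb3.resolve_left (by omega)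
    have hax : x < f (a + 1) := ha4.resolve_left (by omega)
    have := mono (a + 1) b (by omega) hb2
    omega
  have h1 := aux u v hu hv
  have h2 := aux v u hv hu
  omega

theorem clamp_char (lines : List (List Char)) (pre : List Int)
    (hP : ∀ m, m ≤ lines.length → pre.getD m 0 = pfxI lines m)
    (x : Int) (d i N : Nat) (hd : N + 1 - i ≤ d) (hiN : i ≤ N) (hN : N ≤ lines.length) :
    Bdry (pfxI lines) i N x (max (bBisR pre x d i (N + 1) - 1) i) := by
  obtain ⟨h1, h2, h3, h4⟩ := bBisR_spec pre x d i (N + 1) hd (by omega)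
  set r := bBisR pre x d i (N + 1) with hr
  by_cases hri : r ≤ i
  · have hri' : r = i := by omega
    have hmax : max (r - 1) i = i := by omega
    rw [hmax]
    refine ⟨Nat.le_refl _, hiN, Or.inl rfl, ?_⟩
    by_cases hiN' : i = N
    · exact Or.inl hiN'
    · right
      have h5 : ¬ pre.getD r 0 ≤ x := h4.resolve_left (by omega)
      rw [hri', hP i (by omega)] at h5
      have hm := pfxI_mono lines i (i + 1) (by omega)
      omega
  · have hmax : max (r - 1) i = r - 1 := by omega
    rw [hmax]
    refine ⟨by omega, by omega, ?_, ?_⟩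
    · right
      have hle : pre.getD (r - 1) 0 ≤ x := h3.resolve_left (by omega)
      rwa [hP (r - 1) (by omega)] at hle
    · by_cases hrn : r - 1 = N
      · exact Or.inl hrn
      · right
        have h5 : ¬ pre.getD r 0 ≤ x := h4.resolve_left (by omega)
        have hru : r - 1 + 1 = r := by omega
        rw [hru, hP r (by omega)] at *
        omega

theorem aScanJ_char (lines : List (List Char)) (cs : Int) (i : Nat) :
    ∀ (d j : Nat), lines.length - j ≤ d → i ≤ j → j ≤ lines.length →
      Bdry (pfxI lines) j lines.length (pfxI lines i + cs)
        (aScanJ lines cs d (pfxI lines j - pfxI lines i) j).2 := by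
  intro d
  induction d with
  | zero =>
    intro j h1 h2 h3
    simp only [aScanJ]
    exact ⟨Nat.le_refl _, h3, by simp, Or.inl (by omega)⟩
  | succ d ih =>
    intro j h1 h2 h3
    simp only [aScanJ]
    by_cases hc : j < lines.length ∧ pfxI lines j - pfxI lines i + ((lines.getD j []).length : Int) ≤ cs
    · simp only [if_pos hc]
      have hstep : pfxI lines j - pfxI lines i + ((lines.getD j []).length : Int)
          = pfxI lines (j + 1) - pfxI lines i := by
        rw [pfxI_succ lines j hc.1]; ring
      rw [hstep]
      obtain ⟨g1, g2, g3, g4⟩ := ih (j + 1) (by omega) (by omega) (by omega)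
      refine ⟨by omega, g2, ?_, g4⟩
      rcases g3 with h | h
      · right; rw [h]
        have h5 := hc.2
        omega
      · right; exact h
    · simp only [if_neg hc]
      refine ⟨Nat.le_refl _, h3, Or.inl rfl, ?_⟩
      by_cases hjn : j = lines.length
      · exact Or.inl hjn
      · right
        have hc2 : ¬ (pfxI lines j - pfxI lines i + ((lines.getD j []).length : Int) ≤ cs) := by
          intro hx; exact hc ⟨by omega, hx⟩
        have h5 := pfxI_succ lines j (by omega)
        omega

theorem aScanJ_bdry (lines : List (List Char)) (cs : Int) (i : Nat) (hi : i ≤ lines.length) :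
    Bdry (pfxI lines) i lines.length (pfxI lines i + cs) (aScanJ lines cs (lines.length - i) 0 i).2 := by
  have h0 : (0 : Int) = pfxI lines i - pfxI lines i := by ring
  rw [h0]
  exact aScanJ_char lines cs i (lines.length - i) i (Nat.le_refl _) (Nat.le_refl _) hi

theorem aScanK_char (lines : List (List Char)) (ov : Int) (i jend : Nat) (hj : jend ≤ lines.length) :
    ∀ (d k : Nat), k ≤ d → i ≤ k → k ≤ jend →
      Bdry (pfxI lines) i k (pfxI lines jend - ov)
        (aScanK lines ov i d (pfxI lines jend - pfxI lines k) k).2 := by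
  intro d
  induction d with
  | zero =>
    intro k h1 h2 h3
    simp only [aScanK]
    exact ⟨h2, Nat.le_refl _, Or.inl (by omega), by simp⟩
  | succ d ih =>
    intro k h1 h2 h3
    simp only [aScanK]
    by_cases hc : i < k ∧ pfxI lines jend - pfxI lines k < ov
    · simp only [if_pos hc]
      have hk1 : k - 1 + 1 = k := by omega
      have hstep : pfxI lines jend - pfxI lines k + ((lines.getD (k - 1) []).length : Int)
          = pfxI lines jend - pfxI lines (k - 1) := by
        have h5 := pfxI_succ lines (k - 1) (by omega)
        rw [hk1] at h5
        omega
      rw [hstep]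
      obtain ⟨g1, g2, g3, g4⟩ := ih (k - 1) (by omega) (by omega) (by omega)
      refine ⟨g1, by omega, g3, ?_⟩
      rcases g4 with h | h
      · right
        rw [h, hk1]
        have h5 := hc.2
        omega
      · right; exact h
    · simp only [if_neg hc]
      refine ⟨h2, Nat.le_refl _, ?_, Or.inl rfl⟩
      by_cases hik : i < k
      · right
        have hb : ¬ (pfxI lines jend - pfxI lines k < ov) := by
          intro hx; exact hc ⟨hik, hx⟩
        omega
      · exact Or.inl (by omega)

theorem aScanK_bdry (lines : List (List Char)) (ov : Int) (i jend : Nat)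
    (hij : i ≤ jend) (hj : jend ≤ lines.length) :
    Bdry (pfxI lines) i jend (pfxI lines jend - ov) (aScanK lines ov i jend 0 jend).2 := by
  have h0 : (0 : Int) = pfxI lines jend - pfxI lines jend := by ring
  rw [h0]
  exact aScanK_char lines ov i jend hj jend jend (Nat.le_refl _) hij (Nat.le_refl _)

theorem loops_eq (lines : List (List Char)) (pre : List Int)
    (hP : ∀ m, m ≤ lines.length → pre.getD m 0 = pfxI lines m)
    (cs ov : Int) :
    ∀ (fuel i : Nat) (acc : List (Int × Int × String)), lines.length - i ≤ fuel →
      aLoop lines cs ov fuel i acc = bLoop lines pre cs ov fuel i acc := by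
  intro fuel
  induction fuel with
  | zero => intro i acc h; rfl
  | succ fuel ih =>
    intro i acc h
    simp only [aLoop, bLoop]
    by_cases hi : i < lines.length
    · simp only [if_pos hi]
      have hj : (aScanJ lines cs (lines.length - i) 0 i).2
          = max (bBisR pre (pre.getD i 0 + cs) (lines.length + 1 - i) i (lines.length + 1) - 1) i := by
        have hA := aScanJ_bdry lines cs i (by omega)
        have hB := clamp_char lines pre hP (pfxI lines i + cs) (lines.length + 1 - i) i lines.length
          (Nat.le_refl _) (by omega) (Nat.le_refl _)
        rw [hP i (by omega)]
        exact bdry_unique (pfxI lines) i lines.length (pfxI lines i + cs)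
          (fun a b hab _ => pfxI_mono lines a b hab) _ _ hA hB
      rw [hj]
      set j0 := max (bBisR pre (pre.getD i 0 + cs) (lines.length + 1 - i) i (lines.length + 1) - 1) i with hj0
      set j := if j0 = i then i + 1 else j0 with hjdef
      have hij : i ≤ j := by
        rw [hjdef]
        split_ifs with h1
        · omega
        · omega
      by_cases hcase : lines.length ≤ j
      · simp only [if_pos hcase]
      · simp only [if_neg hcase]
        have hjn : j ≤ lines.length := by omega
        have hk : (aScanK lines ov i j 0 j).2
            = max (bBisR pre (pre.getD j 0 - ov) (j + 1 - i) i (j + 1) - 1) i := by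
          have hA := aScanK_bdry lines ov i j hij hjn
          have hB := clamp_char lines pre hP (pfxI lines j - ov) (j + 1 - i) i j (Nat.le_refl _) hij hjn
          rw [hP j hjn]
          exact bdry_unique (pfxI lines) i j (pfxI lines j - ov)
            (fun a b hab _ => pfxI_mono lines a b hab) _ _ hA hB
        rw [hk]
        exact ih _ _ (by omega)
    · simp only [if_neg hi]

-- ===== VERDICT (by name: the statement is the Claim_ definition above) =====
theorem split_lines_into_chunks_py_spec : Claim_equal_split_lines_into_chunks_py := by
  intro text cs ov _dom
  unfold Spec_split_lines_into_chunks_py split_lines_into_chunks_py split_lines_into_chunks_py_alt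
  by_cases h : text = ""
  · simp [h]
  · simp only [if_neg h]
    exact loops_eq _ _ (fun m hm => bBuildPrefix_getD _ m hm) cs ov (pySplitKeep text.toList).length 0 [] (by omega)
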